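-- pv_equiv track=rewrite | github.com/ICST-AI-Delivery/Full-pipeline-testcase-generator- | modules/fpi_analyzer/complete_dependency_analyzer.py | determine_dependency_score
-- ===== SOURCE A (Python) =====
-- def determine_dependency_score(main_fpi, related_fpi, main_content, related_content):
--     """
--     Determine dependency score using sophisticated analysis
--     Score range: -3 to +3 (antisymmetric matrix)
--     """
--
--     # Audio-related keywords for 2xA2B_Audio_Layout
--     audio_keywords = [
--         'audio', 'sound', 'speaker', 'amplifier', 'a2b', 'channel', 'volume',
--         'music', 'radio', 'tuner', 'microphone', 'acoustic', 'frequency',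
--         'stereo', 'mono', 'bass', 'treble', 'equalizer', 'dsp'
--     ]
--
--     # System integration keywords
--     integration_keywords = [
--         'power', 'voltage', 'current', 'supply', 'ground', 'signal',
--         'communication', 'can', 'ethernet', 'protocol', 'interface'
--     ]
--
--     # HMI/User interaction keywords
--     hmi_keywords = [
--         'display', 'screen', 'button', 'touch', 'user', 'interface',
--         'menu', 'setting', 'control', 'command'
--     ]
--
--     # Analyze feature name relationships
--     main_lower = main_fpi.lower()
--     related_lower = related_fpi.lower()
--
--     # Critical dependencies (+3/-3)
--     if any(keyword in related_lower for keyword in ['a2b', 'audio_layout', '2xa2b']):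
--         if 'network' in related_lower or 'master' in related_lower:
--             return 3, "Critical A2B network dependency", "Direct A2B network relationship"
--         elif 'configuration' in related_lower or 'measurement' in related_lower:
--             return 3, "Critical A2B configuration dependency", "A2B configuration relationship"
--
--     # Audio system dependencies
--     if any(keyword in related_lower for keyword in audio_keywords):
--         if 'channel' in related_lower and any(num in related_lower for num in ['1', '2', '3', '4', '5', '6', '7', '8']):
--             return 2, "High priority audio channel dependency", "Audio channel configuration"
--         elif 'loudspeaker' in related_lower or 'speaker' in related_lower:
--             return 2, "High priority speaker dependency", "Speaker output relationship"
--         elif 'volume' in related_lower or 'audio_preset' in related_lower: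
--             return 1, "Optional audio setting dependency", "Audio configuration relationship"
--
--     # Power and system dependencies
--     if any(keyword in related_lower for keyword in integration_keywords):
--         if 'power' in related_lower and 'management' in related_lower:
--             return 2, "High priority power dependency", "Power management relationship"
--         elif 'voltage' in related_lower or 'current' in related_lower:
--             return 1, "Optional power parameter dependency", "Power parameter relationship"
--
--     # HMI dependencies
--     if any(keyword in related_lower for keyword in hmi_keywords):
--         if 'audio' in related_lower and ('setting' in related_lower or 'control' in related_lower):
--             return 1, "Optional HMI audio control dependency", "Audio control interface"
--
--     # Diagnostic dependencies
--     if 'diagnostic' in related_lower or 'dtc' in related_lower: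
--         if any(keyword in related_lower for keyword in audio_keywords):
--             return 1, "Optional diagnostic dependency", "Audio diagnostic relationship"
--
--     # Default: no significant dependency
--     return 0, "No significant dependency identified", "No clear relationship found"
-- ===== SOURCE B (Python) =====
-- # Rule-table re-implementation: ordered (predicate, result) rules over the lowered
-- # related-FPI name, first match wins; group guards are dropped where the inner
-- # test already implies them.
--
-- AUDIO_KEYWORDS = [
--     'audio', 'sound', 'speaker', 'amplifier', 'a2b', 'channel', 'volume',
--     'music', 'radio', 'tuner', 'microphone', 'acoustic', 'frequency',
--     'stereo', 'mono', 'bass', 'treble', 'equalizer', 'dsp'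
-- ]
--
-- RULES = [
--     (lambda r: ('a2b' in r or 'audio_layout' in r or '2xa2b' in r)
--                and ('network' in r or 'master' in r),
--      (3, "Critical A2B network dependency", "Direct A2B network relationship")),
--     (lambda r: ('a2b' in r or 'audio_layout' in r or '2xa2b' in r)
--                and ('configuration' in r or 'measurement' in r),
--      (3, "Critical A2B configuration dependency", "A2B configuration relationship")),
--     (lambda r: 'channel' in r and any(num in r for num in ['1', '2', '3', '4', '5', '6', '7', '8']),
--      (2, "High priority audio channel dependency", "Audio channel configuration")),
--     (lambda r: 'loudspeaker' in r or 'speaker' in r,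
--      (2, "High priority speaker dependency", "Speaker output relationship")),
--     (lambda r: 'volume' in r or 'audio_preset' in r,
--      (1, "Optional audio setting dependency", "Audio configuration relationship")),
--     (lambda r: 'power' in r and 'management' in r,
--      (2, "High priority power dependency", "Power management relationship")),
--     (lambda r: 'voltage' in r or 'current' in r,
--      (1, "Optional power parameter dependency", "Power parameter relationship")),
--     (lambda r: 'audio' in r and ('setting' in r or 'control' in r),
--      (1, "Optional HMI audio control dependency", "Audio control interface")),
--     (lambda r: ('diagnostic' in r or 'dtc' in r) and any(k in r for k in AUDIO_KEYWORDS),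
--      (1, "Optional diagnostic dependency", "Audio diagnostic relationship")),
-- ]
--
--
-- def determine_dependency_score(main_fpi, related_fpi, main_content, related_content):
--     related_lower = related_fpi.lower()
--     for predicate, result in RULES:
--         if predicate(related_lower):
--             return result
--     return 0, "No significant dependency identified", "No clear relationship found"
-- ===== Notes on version B (the rewrite author's own statement) =====
-- stated objective: idiomatic
-- what changed: Replaces A's cascade of guarded if/elif blocks with fall-through by a flat ordered rule table of (predicate, result) pairs scanned for the first match; redundant group guards are dropped where the inner keyword test already implies them, and the keyword lists/rules are built once at module level instead of on every call.
import Mathlib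
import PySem

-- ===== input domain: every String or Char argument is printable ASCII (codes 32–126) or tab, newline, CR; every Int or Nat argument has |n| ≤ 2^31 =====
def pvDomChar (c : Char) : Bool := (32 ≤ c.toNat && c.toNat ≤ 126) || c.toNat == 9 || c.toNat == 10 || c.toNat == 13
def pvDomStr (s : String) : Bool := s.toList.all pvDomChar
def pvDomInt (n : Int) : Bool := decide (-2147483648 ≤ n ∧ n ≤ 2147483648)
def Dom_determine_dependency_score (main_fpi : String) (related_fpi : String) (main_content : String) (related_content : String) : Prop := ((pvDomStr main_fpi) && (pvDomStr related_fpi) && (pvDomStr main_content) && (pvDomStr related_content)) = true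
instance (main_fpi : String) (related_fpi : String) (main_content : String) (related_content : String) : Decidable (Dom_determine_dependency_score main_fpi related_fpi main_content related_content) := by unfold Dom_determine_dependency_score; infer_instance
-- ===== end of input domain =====

-- B replaces A's cascade of guarded if/elif blocks (with fall-through) by a flat ordered
-- rule table (predicate, result) scanned for the first match; same return value everywhere.

-- ===== PORT A =====
-- A's early returns with fall-through are encoded bottom-up: each later block is a
-- let-bound continuation reached when the previous block's guard or inner tests fail.
def determine_dependency_score (main_fpi : String) (related_fpi : String) (main_content : String) (related_content : String) : Int × String × String :=
  let audio_keywords : List String :=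
    ["audio", "sound", "speaker", "amplifier", "a2b", "channel", "volume",
     "music", "radio", "tuner", "microphone", "acoustic", "frequency",
     "stereo", "mono", "bass", "treble", "equalizer", "dsp"]
  let integration_keywords : List String :=
    ["power", "voltage", "current", "supply", "ground", "signal",
     "communication", "can", "ethernet", "protocol", "interface"]
  let hmi_keywords : List String :=
    ["display", "screen", "button", "touch", "user", "interface",
     "menu", "setting", "control", "command"]
  let _main_lower := PySem.Str.lower main_fpi
  let related_lower := PySem.Str.lower related_fpi
  let defaultRes : Int × String × String :=
    (0, "No significant dependency identified", "No clear relationship found")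
  let block5 :=
    if PySem.Str.isIn "diagnostic" related_lower || PySem.Str.isIn "dtc" related_lower then
      if audio_keywords.any (fun k => PySem.Str.isIn k related_lower) then
        (1, "Optional diagnostic dependency", "Audio diagnostic relationship")
      else defaultRes
    else defaultRes
  let block4 :=
    if hmi_keywords.any (fun k => PySem.Str.isIn k related_lower) then
      if PySem.Str.isIn "audio" related_lower && (PySem.Str.isIn "setting" related_lower || PySem.Str.isIn "control" related_lower) then
        (1, "Optional HMI audio control dependency", "Audio control interface")
      else block5
    else block5
  let block3 :=
    if integration_keywords.any (fun k => PySem.Str.isIn k related_lower) then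
      if PySem.Str.isIn "power" related_lower && PySem.Str.isIn "management" related_lower then
        (2, "High priority power dependency", "Power management relationship")
      else if PySem.Str.isIn "voltage" related_lower || PySem.Str.isIn "current" related_lower then
        (1, "Optional power parameter dependency", "Power parameter relationship")
      else block4
    else block4
  let block2 :=
    if audio_keywords.any (fun k => PySem.Str.isIn k related_lower) then
      if PySem.Str.isIn "channel" related_lower && (["1", "2", "3", "4", "5", "6", "7", "8"].any (fun num => PySem.Str.isIn num related_lower)) then
        (2, "High priority audio channel dependency", "Audio channel configuration")
      else if PySem.Str.isIn "loudspeaker" related_lower || PySem.Str.isIn "speaker" related_lower then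
        (2, "High priority speaker dependency", "Speaker output relationship")
      else if PySem.Str.isIn "volume" related_lower || PySem.Str.isIn "audio_preset" related_lower then
        (1, "Optional audio setting dependency", "Audio configuration relationship")
      else block3
    else block3
  if ["a2b", "audio_layout", "2xa2b"].any (fun k => PySem.Str.isIn k related_lower) then
    if PySem.Str.isIn "network" related_lower || PySem.Str.isIn "master" related_lower then
      (3, "Critical A2B network dependency", "Direct A2B network relationship")
    else if PySem.Str.isIn "configuration" related_lower || PySem.Str.isIn "measurement" related_lower then
      (3, "Critical A2B configuration dependency", "A2B configuration relationship")
    else block2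
  else block2

-- ===== PORT B =====
def pvAudioKeywords : List String :=
  ["audio", "sound", "speaker", "amplifier", "a2b", "channel", "volume",
   "music", "radio", "tuner", "microphone", "acoustic", "frequency",
   "stereo", "mono", "bass", "treble", "equalizer", "dsp"]

def pvRules : List ((String → Bool) × (Int × String × String)) :=
  [ (fun r => (PySem.Str.isIn "a2b" r || PySem.Str.isIn "audio_layout" r || PySem.Str.isIn "2xa2b" r)
              && (PySem.Str.isIn "network" r || PySem.Str.isIn "master" r),
     (3, "Critical A2B network dependency", "Direct A2B network relationship")),
    (fun r => (PySem.Str.isIn "a2b" r || PySem.Str.isIn "audio_layout" r || PySem.Str.isIn "2xa2b" r)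
              && (PySem.Str.isIn "configuration" r || PySem.Str.isIn "measurement" r),
     (3, "Critical A2B configuration dependency", "A2B configuration relationship")),
    (fun r => PySem.Str.isIn "channel" r && (["1", "2", "3", "4", "5", "6", "7", "8"].any (fun num => PySem.Str.isIn num r)),
     (2, "High priority audio channel dependency", "Audio channel configuration")),
    (fun r => PySem.Str.isIn "loudspeaker" r || PySem.Str.isIn "speaker" r,
     (2, "High priority speaker dependency", "Speaker output relationship")),
    (fun r => PySem.Str.isIn "volume" r || PySem.Str.isIn "audio_preset" r,
     (1, "Optional audio setting dependency", "Audio configuration relationship")),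
    (fun r => PySem.Str.isIn "power" r && PySem.Str.isIn "management" r,
     (2, "High priority power dependency", "Power management relationship")),
    (fun r => PySem.Str.isIn "voltage" r || PySem.Str.isIn "current" r,
     (1, "Optional power parameter dependency", "Power parameter relationship")),
    (fun r => PySem.Str.isIn "audio" r && (PySem.Str.isIn "setting" r || PySem.Str.isIn "control" r),
     (1, "Optional HMI audio control dependency", "Audio control interface")),
    (fun r => (PySem.Str.isIn "diagnostic" r || PySem.Str.isIn "dtc" r)
              && pvAudioKeywords.any (fun k => PySem.Str.isIn k r),
     (1, "Optional diagnostic dependency", "Audio diagnostic relationship")) ]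

-- the for-loop over RULES: first rule whose predicate holds wins, else the default
def pvFirstMatch (r : String) : List ((String → Bool) × (Int × String × String)) → Int × String × String
  | [] => (0, "No significant dependency identified", "No clear relationship found")
  | rule :: rest => if rule.1 r then rule.2 else pvFirstMatch r rest

def determine_dependency_score_alt (main_fpi : String) (related_fpi : String) (main_content : String) (related_content : String) : Int × String × String :=
  pvFirstMatch (PySem.Str.lower related_fpi) pvRules

-- ===== PRECONDITION & SPEC =====
def Spec_determine_dependency_score (main_fpi : String) (related_fpi : String) (main_content : String) (related_content : String) (out : Int × String × String) : Prop := out = determine_dependency_score_alt main_fpi related_fpi main_content related_content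
instance (main_fpi : String) (related_fpi : String) (main_content : String) (related_content : String) (out : Int × String × String) : Decidable (Spec_determine_dependency_score main_fpi related_fpi main_content related_content out) := by unfold Spec_determine_dependency_score; infer_instance

-- ===== CLAIM (what is proved, stated in full; the proofs are below) =====
def Claim_equal_determine_dependency_score : Prop := ∀ (main_fpi : String) (related_fpi : String) (main_content : String) (related_content : String), Dom_determine_dependency_score main_fpi related_fpi main_content related_content → Spec_determine_dependency_score main_fpi related_fpi main_content related_content (determine_dependency_score main_fpi related_fpi main_content related_content)

-- ===== LEMMAS AND PROOFS =====

-- abbreviations for A's three group guards (exactly the terms A's port computes)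
def pvAudioAny (r : String) : Bool := pvAudioKeywords.any (fun k => PySem.Str.isIn k r)
def pvIntegAny (r : String) : Bool :=
  (["power", "voltage", "current", "supply", "ground", "signal",
    "communication", "can", "ethernet", "protocol", "interface"] : List String).any
    (fun k => PySem.Str.isIn k r)
def pvHmiAny (r : String) : Bool :=
  (["display", "screen", "button", "touch", "user", "interface",
    "menu", "setting", "control", "command"] : List String).any
    (fun k => PySem.Str.isIn k r)

-- flatten A's guarded blocks: guard distributed over the inner elif chain
theorem pv_fl1 {α : Type} (g c : Bool) (X R : α) :
    (if g then (if c then X else R) else R) = (if g && c then X else R) := by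
  cases g <;> simp
theorem pv_fl2 {α : Type} (g c c' : Bool) (X Y R : α) :
    (if g then (if c then X else if c' then Y else R) else R)
      = (if g && c then X else if g && c' then Y else R) := by
  cases g <;> simp
theorem pv_fl3 {α : Type} (g c c' c'' : Bool) (X Y Z R : α) :
    (if g then (if c then X else if c' then Y else if c'' then Z else R) else R)
      = (if g && c then X else if g && c' then Y else if g && c'' then Z else R) := by
  cases g <;> simp

-- introduce a redundant guard in front of a rule whose condition already implies it
theorem pv_gi {α : Type} {c : Bool} (g : Bool) {X R : α} (h : c = true → g = true) :
    (if c then X else R) = (if g && c then X else R) := by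
  cases hc : c
  · simp
  · simp [h hc]

-- substring containment is transitive through a fixed superstring
theorem pv_isIn_mono (sub sup r : String) (hss : sub.toList <:+: sup.toList)
    (h : PySem.Str.isIn sup r = true) : PySem.Str.isIn sub r = true := by
  rw [PySem.Str.isIn_eq, PySem.Chars.isIn_iff_infix] at h ⊢
  exact hss.trans h

-- each guard-free rule condition implies the group guard A checks first
theorem pv_imp_channel (r : String) {d : Bool}
    (h : (PySem.Str.isIn "channel" r && d) = true) : pvAudioAny r = true := by
  have hc : PySem.Str.isIn "channel" r = true := Bool.and_elim_left h
  simp only [pvAudioAny, pvAudioKeywords, List.any_cons, List.any_nil, hc, Bool.or_true, Bool.true_or, Bool.or_false]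
theorem pv_imp_speaker (r : String)
    (h : (PySem.Str.isIn "loudspeaker" r || PySem.Str.isIn "speaker" r) = true) :
    pvAudioAny r = true := by
  have hs : PySem.Str.isIn "speaker" r = true := by
    rcases Bool.or_eq_true_iff.mp h with h' | h'
    · exact pv_isIn_mono "speaker" "loudspeaker" r (by decide) h'
    · exact h'
  simp only [pvAudioAny, pvAudioKeywords, List.any_cons, List.any_nil, hs, Bool.or_true, Bool.true_or, Bool.or_false]
theorem pv_imp_volume (r : String)
    (h : (PySem.Str.isIn "volume" r || PySem.Str.isIn "audio_preset" r) = true) :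
    pvAudioAny r = true := by
  rcases Bool.or_eq_true_iff.mp h with h' | h'
  · simp only [pvAudioAny, pvAudioKeywords, List.any_cons, List.any_nil, h', Bool.or_true, Bool.true_or, Bool.or_false]
  · have ha : PySem.Str.isIn "audio" r = true :=
      pv_isIn_mono "audio" "audio_preset" r (by decide) h'
    simp only [pvAudioAny, pvAudioKeywords, List.any_cons, List.any_nil, ha, Bool.true_or, Bool.or_false]
theorem pv_imp_power (r : String) {d : Bool}
    (h : (PySem.Str.isIn "power" r && d) = true) : pvIntegAny r = true := by
  have hp : PySem.Str.isIn "power" r = true := Bool.and_elim_left h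
  simp only [pvIntegAny, List.any_cons, List.any_nil, hp, Bool.true_or, Bool.or_false]
theorem pv_imp_voltcur (r : String)
    (h : (PySem.Str.isIn "voltage" r || PySem.Str.isIn "current" r) = true) :
    pvIntegAny r = true := by
  rcases Bool.or_eq_true_iff.mp h with h' | h' <;> simp only [pvIntegAny, List.any_cons, List.any_nil, h', Bool.or_true, Bool.true_or, Bool.or_false]
theorem pv_imp_hmi (r : String) {d : Bool}
    (h : (d && (PySem.Str.isIn "setting" r || PySem.Str.isIn "control" r)) = true) :
    pvHmiAny r = true := by
  rcases Bool.or_eq_true_iff.mp (Bool.and_elim_right h) with h' | h' <;> simp only [pvHmiAny, List.any_cons, List.any_nil, h', Bool.or_true, Bool.true_or, Bool.or_false]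

-- ===== VERDICT (by name: the statement is the Claim_ definition above) =====
theorem determine_dependency_score_spec : Claim_equal_determine_dependency_score := by
  intro main_fpi related_fpi main_content related_content _
  unfold Spec_determine_dependency_score
  unfold determine_dependency_score determine_dependency_score_alt
  simp only [pvRules, pvFirstMatch]
  rw [pv_fl2, pv_fl3, pv_fl2, pv_fl1, pv_fl1]
  rw [pv_gi (pvAudioAny (PySem.Str.lower related_fpi)) (pv_imp_channel _),
      pv_gi (pvAudioAny (PySem.Str.lower related_fpi)) (pv_imp_speaker _),
      pv_gi (pvAudioAny (PySem.Str.lower related_fpi)) (pv_imp_volume _),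
      pv_gi (pvIntegAny (PySem.Str.lower related_fpi)) (pv_imp_power _),
      pv_gi (pvIntegAny (PySem.Str.lower related_fpi)) (pv_imp_voltcur _),
      pv_gi (pvHmiAny (PySem.Str.lower related_fpi)) (pv_imp_hmi _)]
  simp only [pvAudioAny, pvIntegAny, pvHmiAny, pvAudioKeywords,
    List.any_cons, List.any_nil, Bool.or_false, Bool.or_assoc]
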